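-- pv_equiv track=rewrite | github.com/flying-pisces/factory-test-station | manufacturing-line/testing/scripts/run_week1_tests.py | _validate_week1_objectives
-- ===== SOURCE A (Python) =====
-- from typing import Dict, Any, List, Optional
--
-- def _validate_week1_objectives(test_results: Dict[str, Any]) -> Dict[str, Any]:
--     """Validate Week 1 specific objectives."""
--     objectives_status = {
--         'super_admin_layer': 'not_tested',
--         'data_socket_architecture': 'not_tested',
--         'database_integration': 'not_tested',
--         'authentication_system': 'not_tested',
--         'ui_framework': 'not_tested'
--     }
--
--     # Map test results to objectives
--     for test_name, result in test_results.items():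
--         if 'Super Admin Layer' in test_name:
--             objectives_status['super_admin_layer'] = 'passed' if result['success'] else 'failed'
--         elif 'Data Socket' in test_name:
--             objectives_status['data_socket_architecture'] = 'passed' if result['success'] else 'failed'
--         elif 'Database' in test_name:
--             objectives_status['database_integration'] = 'passed' if result['success'] else 'failed'
--
--     return objectives_status
-- ===== SOURCE B (Python) =====
-- def _validate_week1_objectives(test_results):
--     """Validate Week 1 specific objectives (table-driven, built per objective)."""
--     mapping = [('super_admin_layer', 'Super Admin Layer'),
--                ('data_socket_architecture', 'Data Socket'),
--                ('database_integration', 'Database')]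
--
--     def classify(test_name):
--         for key, sub in mapping:
--             if sub in test_name:
--                 return key
--         return None
--
--     status = {}
--     for key, _ in mapping:
--         last = None
--         for test_name, result in test_results.items():
--             if classify(test_name) == key:
--                 last = result
--         if last is None:
--             status[key] = 'not_tested'
--         else:
--             status[key] = 'passed' if last['success'] else 'failed'
--     status['authentication_system'] = 'not_tested'
--     status['ui_framework'] = 'not_tested'
--     return status
-- ===== Notes on version B (the rewrite author's own statement) =====
-- stated objective: alternative
-- what changed: Replaces the single mutating pass with an if/elif chain by a table of (objective, substring) pairs and builds the output per objective, keeping only the last matching test's result for each objective.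
import Mathlib
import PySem

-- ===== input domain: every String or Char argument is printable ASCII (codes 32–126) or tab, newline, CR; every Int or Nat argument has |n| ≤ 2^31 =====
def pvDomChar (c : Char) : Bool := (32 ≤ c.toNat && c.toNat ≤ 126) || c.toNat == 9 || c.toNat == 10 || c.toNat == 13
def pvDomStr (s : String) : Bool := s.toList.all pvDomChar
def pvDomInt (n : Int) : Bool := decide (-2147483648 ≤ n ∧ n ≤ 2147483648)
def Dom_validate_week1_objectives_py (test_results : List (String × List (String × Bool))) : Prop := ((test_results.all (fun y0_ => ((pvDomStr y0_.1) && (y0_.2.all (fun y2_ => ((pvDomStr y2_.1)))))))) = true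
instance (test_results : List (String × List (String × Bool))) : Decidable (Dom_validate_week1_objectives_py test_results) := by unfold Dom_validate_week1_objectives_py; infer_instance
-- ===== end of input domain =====

-- B replaces A's single mutating pass with an if/elif chain by a substring table and
-- builds the status per objective from the last matching test (alternative decomposition, same cost).


-- ===== PORT A =====
-- result['success'] : total form getD false; Pre_ excludes inputs where the key is absent (Python KeyError)
def vwSuccess (r : List (String × Bool)) : Bool :=
  ((PySem.Dict.ofList r).get? "success").getD false

-- 'passed' if result['success'] else 'failed'
def vwVerdict (r : List (String × Bool)) : String :=
  if vwSuccess r then "passed" else "failed"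

def vwStepA (d : PySem.Dict String String) (p : String × List (String × Bool)) :
    PySem.Dict String String :=
  if PySem.Str.isIn "Super Admin Layer" p.1 then
    d.insert "super_admin_layer" (vwVerdict p.2)
  else if PySem.Str.isIn "Data Socket" p.1 then
    d.insert "data_socket_architecture" (vwVerdict p.2)
  else if PySem.Str.isIn "Database" p.1 then
    d.insert "database_integration" (vwVerdict p.2)
  else d

def validate_week1_objectives_py (test_results : List (String × List (String × Bool))) :
    List (String × String) :=
  (test_results.foldl vwStepA
    (PySem.Dict.ofList
      [("super_admin_layer", "not_tested"),
       ("data_socket_architecture", "not_tested"),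
       ("database_integration", "not_tested"),
       ("authentication_system", "not_tested"),
       ("ui_framework", "not_tested")])).items

-- ===== PORT B =====
def vwMapping : List (String × String) :=
  [("super_admin_layer", "Super Admin Layer"),
   ("data_socket_architecture", "Data Socket"),
   ("database_integration", "Database")]

def vwClassify (test_name : String) : Option String :=
  (vwMapping.find? (fun p => PySem.Str.isIn p.2 test_name)).map (·.1)

def vwLast (key : String) (test_results : List (String × List (String × Bool))) :
    Option (List (String × Bool)) :=
  test_results.foldl
    (fun acc p => if vwClassify p.1 == some key then some p.2 else acc) none

def vwStatus (key : String) (test_results : List (String × List (String × Bool))) : String :=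
  match vwLast key test_results with
  | none => "not_tested"
  | some r => vwVerdict r

def validate_week1_objectives_py_alt (test_results : List (String × List (String × Bool))) :
    List (String × String) :=
  vwMapping.map (fun p => (p.1, vwStatus p.1 test_results)) ++
    [("authentication_system", "not_tested"), ("ui_framework", "not_tested")]

-- ===== PRECONDITION & SPEC =====
-- Pre_ excludes exactly the inputs where Python A raises KeyError: a test whose name matches
-- one of the three substrings but whose result dict has no 'success' key.
def Pre_validate_week1_objectives_py (test_results : List (String × List (String × Bool))) : Prop :=
  (test_results.all (fun p =>
    !(PySem.Str.isIn "Super Admin Layer" p.1 || PySem.Str.isIn "Data Socket" p.1 ||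
      PySem.Str.isIn "Database" p.1) ||
    ((PySem.Dict.ofList p.2).get? "success").isSome)) = true
instance (test_results : List (String × List (String × Bool))) : Decidable (Pre_validate_week1_objectives_py test_results) := by unfold Pre_validate_week1_objectives_py; infer_instance

def pvWitness_validate_week1_objectives_py : (List (String × List (String × Bool))) :=
  [("Super Admin Layer Test", [("success", true)]), ("Other Test", [])]

def Spec_validate_week1_objectives_py (test_results : List (String × List (String × Bool))) (out : List (String × String)) : Prop := out = validate_week1_objectives_py_alt test_results
instance (test_results : List (String × List (String × Bool))) (out : List (String × String)) : Decidable (Spec_validate_week1_objectives_py test_results out) := by unfold Spec_validate_week1_objectives_py; infer_instance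

-- ===== CLAIM (what is proved, stated in full; the proofs are below) =====
def Claim_equal_validate_week1_objectives_py : Prop := ∀ (test_results : List (String × List (String × Bool))), Dom_validate_week1_objectives_py test_results → Pre_validate_week1_objectives_py test_results → Spec_validate_week1_objectives_py test_results (validate_week1_objectives_py test_results)

-- ===== LEMMAS AND PROOFS =====

-- B's classifier is A's if/elif chain
lemma vwClassify_eq (n : String) :
    vwClassify n =
      if PySem.Str.isIn "Super Admin Layer" n then some "super_admin_layer"
      else if PySem.Str.isIn "Data Socket" n then some "data_socket_architecture"
      else if PySem.Str.isIn "Database" n then some "database_integration"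
      else none := by
  simp [vwClassify, vwMapping, List.find?]
  split_ifs <;> simp_all

-- a last-match fold through an Option accumulator, read back as a string
lemma vwFold_option_string (key : String) (tr : List (String × List (String × Bool)))
    (o : Option (List (String × Bool))) (s : String) :
    (match tr.foldl (fun acc p => if vwClassify p.1 == some key then some p.2 else acc) o with
     | none => s
     | some r => vwVerdict r) =
    tr.foldl (fun t p => if vwClassify p.1 == some key then vwVerdict p.2 else t)
      (match o with | none => s | some r => vwVerdict r) := by
  induction tr generalizing o with
  | nil => rfl
  | cons p tr ih =>
    simp only [List.foldl_cons]
    by_cases h : vwClassify p.1 == some key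
    · simp only [h]
      simpa using ih (some p.2)
    · simp only [h]
      simpa using ih o

def vwG (key : String) (tr : List (String × List (String × Bool))) (s : String) : String :=
  tr.foldl (fun t p => if vwClassify p.1 == some key then vwVerdict p.2 else t) s

lemma vwStatus_eq_G (key : String) (tr : List (String × List (String × Bool))) :
    vwStatus key tr = vwG key tr "not_tested" := by
  simpa [vwStatus, vwLast, vwG] using vwFold_option_string key tr none "not_tested"

-- insert into the literal status dict, componentwise (keys are literals)
def vwD5 (s1 s2 s3 : String) : PySem.Dict String String :=
  PySem.Dict.ofList
    [("super_admin_layer", s1), ("data_socket_architecture", s2),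
     ("database_integration", s3), ("authentication_system", "not_tested"),
     ("ui_framework", "not_tested")]

lemma vwIns1 (s1 s2 s3 v : String) :
    (vwD5 s1 s2 s3).insert "super_admin_layer" v = vwD5 v s2 s3 := rfl
lemma vwIns2 (s1 s2 s3 v : String) :
    (vwD5 s1 s2 s3).insert "data_socket_architecture" v = vwD5 s1 v s3 := rfl
lemma vwIns3 (s1 s2 s3 v : String) :
    (vwD5 s1 s2 s3).insert "database_integration" v = vwD5 s1 s2 v := rfl

lemma vwG_cons (key : String) (p : String × List (String × Bool))
    (tr : List (String × List (String × Bool))) (s : String) :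
    vwG key (p :: tr) s =
      vwG key tr (if vwClassify p.1 == some key then vwVerdict p.2 else s) := rfl

lemma vwD5_items (s1 s2 s3 : String) :
    (vwD5 s1 s2 s3).items =
      [("super_admin_layer", s1), ("data_socket_architecture", s2),
       ("database_integration", s3), ("authentication_system", "not_tested"),
       ("ui_framework", "not_tested")] := rfl

-- the dict fold of A, componentwise
lemma vwFoldA (tr : List (String × List (String × Bool))) :
    ∀ s1 s2 s3,
      tr.foldl vwStepA (vwD5 s1 s2 s3) =
      vwD5 (vwG "super_admin_layer" tr s1) (vwG "data_socket_architecture" tr s2)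
        (vwG "database_integration" tr s3) := by
  induction tr with
  | nil => intro s1 s2 s3; simp [vwG]
  | cons p tr ih =>
    intro s1 s2 s3
    rw [List.foldl_cons]
    show tr.foldl vwStepA (vwStepA (vwD5 s1 s2 s3) p) = _
    simp only [vwStepA]
    split_ifs with h1 h2 h3 <;>
      simp_all [vwIns1, vwIns2, vwIns3, vwG_cons, vwClassify_eq]

-- ===== VERDICT (by name: the statement is the Claim_ definition above) =====
theorem validate_week1_objectives_py_spec : Claim_equal_validate_week1_objectives_py := by
  intro tr _ _
  show _ = _
  simp only [validate_week1_objectives_py, validate_week1_objectives_py_alt]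
  rw [show (PySem.Dict.ofList
      [("super_admin_layer", "not_tested"), ("data_socket_architecture", "not_tested"),
       ("database_integration", "not_tested"), ("authentication_system", "not_tested"),
       ("ui_framework", "not_tested")]) = vwD5 "not_tested" "not_tested" "not_tested" from rfl,
    vwFoldA, vwD5_items]
  simp [vwMapping, vwStatus_eq_G]
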